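-- pv_equiv track=rewrite | github.com/CryoRenegade/dim-wish-list-splitter | voltron_splitter.py | perkAdjustments
-- ===== SOURCE A (Python) =====
-- from collections import OrderedDict
--
-- def perkAdjustments(wishlist, _weaponAry):
--     weaponAry = []
--     for curLine in _weaponAry:
--         if ("dimwishlist:item=" in curLine):
--             if ("\n" not in curLine):
--                 curLine += "\n"
--             allPerks = curLine[curLine.index("&perks=")+7:curLine.index("\n")].split(",")
--
--             # Remove Origin Perk
--             if (len(allPerks) > 4):
--                 selPerks = [allPerks[i] for i in [0, 1, 2, 3]]
--                 allPerks = selPerks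
--
--             if ("perks" in wishlist and len(allPerks) >= len(wishlist.get("perks"))):
--                 selPerks = [allPerks[i - 5 + len(allPerks)] for i in wishlist.get("perks")]
--                 # selPerks = [allPerks[i] for i in [len(allPerks)-2, len(allPerks)-1]]
--                 curLine = curLine[:curLine.index("&perks=")+7] + ",".join(str(i) for i in selPerks) + "\n"
--
--         weaponAry.append(curLine)
--
--     # Remove duplicates
--     weaponAry = list(OrderedDict.fromkeys(weaponAry))
--
--     # Limits Duplicates
--     #if ("dupes" in wishlist):
--     #    perkCount = OrderedDict(Counter(weaponAry))
--     #    newWeapon = []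
--     #    # newWeapon = {key for key, value in perkCount.items() if value < wishlist.get("dupes")}
--     #    for key, val in perkCount.items():
--     #        if (val > int(wishlist.get("dupes"))):
--     #            val = int(wishlist.get("dupes"))
--     #        for i in range(val):
--     #            newWeapon.append(key)
--     #    return newWeapon
--
--     return weaponAry
-- ===== SOURCE B (Python) =====
-- def _pvTransform(perks_req, curLine):
--     # per-line rewrite: same index arithmetic as the original, but the
--     # wishlist["perks"] lookup is hoisted to the caller and the origin-perk
--     # trim is a [:4] slice
--     if "dimwishlist:item=" in curLine:
--         if "\n" not in curLine:
--             curLine += "\n"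
--         cut = curLine.index("&perks=") + 7
--         allPerks = curLine[cut:curLine.index("\n")].split(",")[:4]
--         if perks_req is not None and len(perks_req) <= len(allPerks):
--             n = len(allPerks)
--             curLine = curLine[:cut] + ",".join(allPerks[i - 5 + n] for i in perks_req) + "\n"
--     return curLine
--
--
-- def perkAdjustments(wishlist, _weaponAry):
--     # Transform with a comprehension, then remove duplicates by repeated
--     # head-and-filter: keep the current head, drop every later copy of it
--     # from the remaining list, and continue on what is left.  First
--     # occurrences survive in order, with no seen-set or dict pass.
--     lines = [_pvTransform(wishlist.get("perks"), line) for line in _weaponAry]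
--     out = []
--     while lines:
--         head = lines[0]
--         out.append(head)
--         lines = [l for l in lines[1:] if l != head]
--     return out
-- ===== Notes on version B (the rewrite author's own statement) =====
-- stated objective: alternative
-- what changed: B replaces A's append-loop plus OrderedDict.fromkeys pass by a comprehension map followed by a head-and-filter duplicate elimination (repeatedly keep the first line and filter all its later copies out of the rest), so no dictionary or seen structure is maintained at all; the perks lookup is hoisted and the origin-perk trim is a [:4] slice.
import Mathlib
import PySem

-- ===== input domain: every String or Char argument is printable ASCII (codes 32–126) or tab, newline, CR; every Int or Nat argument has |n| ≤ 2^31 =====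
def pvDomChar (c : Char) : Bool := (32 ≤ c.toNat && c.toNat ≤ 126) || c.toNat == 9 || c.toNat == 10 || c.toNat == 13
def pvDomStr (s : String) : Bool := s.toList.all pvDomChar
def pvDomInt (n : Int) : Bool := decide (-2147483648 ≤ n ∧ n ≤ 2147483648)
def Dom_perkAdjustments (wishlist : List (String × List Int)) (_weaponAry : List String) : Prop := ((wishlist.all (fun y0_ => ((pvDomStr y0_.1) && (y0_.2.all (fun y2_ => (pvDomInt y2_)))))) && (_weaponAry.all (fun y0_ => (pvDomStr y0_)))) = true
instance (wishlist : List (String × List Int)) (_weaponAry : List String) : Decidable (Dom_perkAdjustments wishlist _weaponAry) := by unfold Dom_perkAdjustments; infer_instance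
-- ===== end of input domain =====

-- B replaces A's append-loop + OrderedDict.fromkeys pass by a comprehension map
-- followed by head-and-filter duplicate elimination (keep the head, filter its
-- copies out of the rest, recurse); same return value.

-- ===== PORT A =====
-- per-line transform of A, transliterated: trim to the first four perks via a
-- comprehension over [0,1,2,3] when len > 4, reindex wishlist["perks"] by i-5+len,
-- rebuild the line up to "&perks=" (str(i) on an element of a str.split is the
-- element itself, so the join is ported on the strings directly)
def pvLineA (wishlist : List (String × List Int)) (curLine : String) : String :=
  if PySem.Str.isIn "dimwishlist:item=" curLine then
    let cs : List Char :=
      if PySem.Chars.isIn ['\n'] curLine.toList then curLine.toList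
      else curLine.toList ++ ['\n']
    -- curLine.index("&perks=") + 7 (Pre_ guarantees the substring is present)
    let pIdx : Nat := (PySem.Chars.find cs "&perks=".toList).toNat + 7
    -- curLine.index("\n") ('\n' is always present after the append above)
    let nIdx : Nat := (PySem.Chars.find cs ['\n']).toNat
    let allPerks : List (List Char) :=
      PySem.Chars.splitOn (PySem.List.slice cs (some (pIdx : Int)) (some (nIdx : Int))) [',']
    let allPerks : List (List Char) :=
      if allPerks.length > 4 then
        [(0 : Int), 1, 2, 3].map (fun i => PySem.List.pyGetD allPerks i [])
      else allPerks
    -- "perks" in wishlist and len(allPerks) >= len(wishlist.get("perks"))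
    if (wishlist.map Prod.fst).contains "perks" &&
        decide (allPerks.length ≥ ((List.lookup "perks" wishlist).getD []).length) then
      let selPerks : List (List Char) :=
        ((List.lookup "perks" wishlist).getD []).map
          (fun i => PySem.List.pyGetD allPerks (i - 5 + (allPerks.length : Int)) [])
      String.ofList (PySem.List.slice cs none (some (pIdx : Int)) ++
        PySem.Chars.join [','] selPerks ++ ['\n'])
    else String.ofList cs
  else curLine

def perkAdjustments (wishlist : List (String × List Int)) (_weaponAry : List String) : List String :=
  let weaponAry := _weaponAry.foldl (fun acc curLine => acc ++ [pvLineA wishlist curLine]) []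
  PySem.List.dedup weaponAry

-- ===== PORT B =====
-- per-line transform of B: the perks request is a parameter (hoisted out of the
-- loop) and the origin-perk trim is the slice [:4]
def pvLineB (perksReq : Option (List Int)) (curLine : String) : String :=
  if PySem.Str.isIn "dimwishlist:item=" curLine then
    let cs : List Char :=
      if PySem.Chars.isIn ['\n'] curLine.toList then curLine.toList
      else curLine.toList ++ ['\n']
    let cut : Nat := (PySem.Chars.find cs "&perks=".toList).toNat + 7
    let allPerks : List (List Char) :=
      (PySem.Chars.splitOn
        (PySem.List.slice cs (some (cut : Int)) (some (((PySem.Chars.find cs ['\n']).toNat : Nat) : Int)))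
        [',']).take 4
    match perksReq with
    | some ps =>
        if ps.length ≤ allPerks.length then
          String.ofList (cs.take cut ++
            PySem.Chars.join [',']
              (ps.map (fun i => PySem.List.pyGetD allPerks (i - 5 + (allPerks.length : Int)) [])) ++
            ['\n'])
        else String.ofList cs
    | none => String.ofList cs
  else curLine

-- B's while loop: keep the head, filter its later copies out of the rest, continue
def pvDedupRec : List String → List String
  | [] => []
  | x :: t => x :: pvDedupRec (t.filter (fun l => !(l == x)))
  termination_by l => l.length
  decreasing_by
    simpa using Nat.lt_succ_of_le (le_trans (List.length_filter_le _ _) (by simp))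

def perkAdjustments_alt (wishlist : List (String × List Int)) (_weaponAry : List String) : List String :=
  pvDedupRec (_weaponAry.map (pvLineB (List.lookup "perks" wishlist)))

-- ===== PRECONDITION & SPEC =====
-- the number of perks a wishlist line carries after the origin-perk trim
def pvPerkCount (curLine : String) : Nat :=
  let cs : List Char :=
    if PySem.Chars.isIn ['\n'] curLine.toList then curLine.toList
    else curLine.toList ++ ['\n']
  min 4 (PySem.Chars.splitOn
    (PySem.List.slice cs (some (((PySem.Chars.find cs "&perks=".toList).toNat + 7 : Nat) : Int))
      (some (((PySem.Chars.find cs ['\n']).toNat : Nat) : Int))) [',']).length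

-- Pre_ excludes exactly the inputs on which A raises: a "dimwishlist:item=" line
-- without "&perks=" (ValueError from .index), and a requested perk index i whose
-- reindexing i-5+len falls outside the trimmed perk list (IndexError).
def Pre_perkAdjustments (wishlist : List (String × List Int)) (_weaponAry : List String) : Prop :=
  ∀ l ∈ _weaponAry, PySem.Str.isIn "dimwishlist:item=" l = true →
    PySem.Str.isIn "&perks=" l = true ∧
    (∀ ps, List.lookup "perks" wishlist = some ps → ps.length ≤ pvPerkCount l →
      ∀ i ∈ ps, PySem.Raise.InRange (pvPerkCount l) (i - 5 + (pvPerkCount l : Int)))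
instance (wishlist : List (String × List Int)) (_weaponAry : List String) : Decidable (Pre_perkAdjustments wishlist _weaponAry) := by unfold Pre_perkAdjustments; infer_instance

def pvWitness_perkAdjustments : (List (String × List Int)) × List String :=
  ([("perks", [3, 4])], ["dimwishlist:item=1&perks=11,22,33,44,55"])

def Spec_perkAdjustments (wishlist : List (String × List Int)) (_weaponAry : List String) (out : List String) : Prop := out = perkAdjustments_alt wishlist _weaponAry
instance (wishlist : List (String × List Int)) (_weaponAry : List String) (out : List String) : Decidable (Spec_perkAdjustments wishlist _weaponAry out) := by unfold Spec_perkAdjustments; infer_instance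

-- ===== CLAIM (what is proved, stated in full; the proofs are below) =====
def Claim_equal_perkAdjustments : Prop := ∀ (wishlist : List (String × List Int)) (_weaponAry : List String), Dom_perkAdjustments wishlist _weaponAry → Pre_perkAdjustments wishlist _weaponAry → Spec_perkAdjustments wishlist _weaponAry (perkAdjustments wishlist _weaponAry)

-- ===== LEMMAS AND PROOFS =====

-- "k in d" read off the association list equals lookup success
theorem pv_contains_eq_lookup_isSome (l : List (String × List Int)) (k : String) :
    (l.map Prod.fst).contains k = (List.lookup k l).isSome := by
  induction l with
  | nil => rfl
  | cons p t ih =>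
      by_cases h : (k == p.1) = true
      · simp [List.lookup, h]
      · simp only [Bool.not_eq_true] at h
        simp [List.lookup, h, List.contains_eq_mem] at ih ⊢
        exact ih

-- the origin-perk trim: first four by comprehension = take 4
theorem pv_trim_eq_take (L : List (List Char)) :
    (if L.length > 4 then [(0 : Int), 1, 2, 3].map (fun i => PySem.List.pyGetD L i []) else L)
      = L.take 4 := by
  split_ifs with h
  · match L, h with
    | a :: b :: c :: d :: rest, _ =>
        simp only [List.map_cons, List.map_nil, PySem.List.pyGetD_ofNat']
        rfl
  · exact (List.take_of_length_le (by omega)).symm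

-- the two per-line transforms agree
theorem pv_line_eq (wishlist : List (String × List Int)) (l : String) :
    pvLineA wishlist l = pvLineB (List.lookup "perks" wishlist) l := by
  unfold pvLineA pvLineB
  by_cases hd : PySem.Str.isIn "dimwishlist:item=" l = true
  · simp only [hd, if_true]
    rw [pv_trim_eq_take]
    rw [pv_contains_eq_lookup_isSome]
    cases hlk : List.lookup "perks" wishlist with
    | none => simp
    | some ps =>
        simp only [Option.isSome_some, Bool.true_and, Option.getD_some, ge_iff_le, decide_eq_true_eq]
        split_ifs with h <;>
          first
          | rw [PySem.List.slice_to _ (Int.natCast_nonneg _), Int.toNat_natCast]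
          | rfl
  · rw [if_neg hd, if_neg hd]

-- cons/nil unfolding of the well-founded head-and-filter recursion
theorem pvDedupRec_nil : pvDedupRec [] = [] := by
  rw [pvDedupRec.eq_def]

theorem pvDedupRec_cons (x : String) (t : List String) :
    pvDedupRec (x :: t) = x :: pvDedupRec (t.filter (fun l => !(l == x))) := by
  rw [pvDedupRec.eq_def]

-- the seen-set fold behind OrderedDict.fromkeys equals head-and-filter dedup:
-- elements already in the accumulator are dropped, a new head is appended and
-- all its later copies are filtered away before the rest is processed
theorem pv_foldl_add_eq_dedupRec (xs s : List String) :
    xs.foldl PySem.Set.add s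
      = s ++ pvDedupRec (xs.filter (fun y => !(s.contains y))) := by
  induction xs generalizing s with
  | nil => simp [pvDedupRec_nil]
  | cons x t ih =>
      by_cases h : s.contains x = true
      · have hxs : x ∈ s := by simpa [List.contains_eq_mem] using h
        have hadd : PySem.Set.add s x = s := by
          simp [PySem.Set.add, PySem.Set.contains, List.contains_eq_mem, hxs]
        rw [List.foldl_cons, hadd, ih s, List.filter_cons, h]
        simp
      · have hxs : x ∉ s := by simpa [List.contains_eq_mem] using h
        have hadd : PySem.Set.add s x = s ++ [x] := by
          simp [PySem.Set.add, PySem.Set.contains, List.contains_eq_mem]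
          exact hxs
        rw [List.foldl_cons, hadd, ih (s ++ [x]), List.filter_cons]
        have hx : (!(s.contains x)) = true := by simp [List.contains_eq_mem, hxs]
        rw [hx]
        have hfil : t.filter (fun y => !((s ++ [x]).contains y))
            = (t.filter (fun y => !(s.contains y))).filter (fun l => !(l == x)) := by
          rw [List.filter_filter]
          apply List.filter_congr
          intro a _
          by_cases hax : a = x
          · subst hax; simp
          · simp [List.contains_eq_mem, hax]
        rw [if_pos rfl, hfil, pvDedupRec_cons]
        simp

-- ===== VERDICT (by name: the statement is the Claim_ definition above) =====
theorem perkAdjustments_spec : Claim_equal_perkAdjustments := by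
  intro wishlist wa _ _
  unfold Spec_perkAdjustments perkAdjustments perkAdjustments_alt
  rw [PySem.List.foldl_append_singleton_eq_map]
  have hmap : wa.map (pvLineA wishlist) = wa.map (pvLineB (List.lookup "perks" wishlist)) :=
    List.map_congr_left (fun l _ => pv_line_eq wishlist l)
  rw [hmap, PySem.List.dedup_eq_ofList, PySem.Set.ofList_eq_foldl, List.nil_append,
    pv_foldl_add_eq_dedupRec]
  simp
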